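-- pv_equiv track=rewrite | github.com/lhf12278/LRIMV | processor/processor.py | nnn
-- ===== SOURCE A (Python) =====
-- def find_repeat(source,elmt): # The source may be a list or string.
--     elmt_index=[]
--     s_index = 0;e_index = len(source)
--     while(s_index < e_index):
--         try:
--             temp = source.index(elmt,s_index,e_index)
--             elmt_index.append(temp)
--             s_index = temp + 1
--         except ValueError:
--             break
--     return elmt_index
--
-- def nnn(per_cam_pid):
--     len_per_cam_pid = len(per_cam_pid)
--     per_c_pid_dict = {}
--     for i in range(len_per_cam_pid):
--         camera_pids = per_cam_pid[i]
--         camera_pid_set = set(camera_pids)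
--         per_c_pid_dict[i] = {}
--         for pid in camera_pid_set:
--             indexx = find_repeat(camera_pids, pid)
--             if pid not in per_c_pid_dict[i].keys():
--                 per_c_pid_dict[i][pid] = indexx
--     return per_c_pid_dict
-- ===== SOURCE B (Python) =====
-- def nnn(per_cam_pid):
--     per_c_pid_dict = {}
--     for i, camera_pids in enumerate(per_cam_pid):
--         d = {}
--         for idx, pid in enumerate(camera_pids):
--             d[pid] = d.get(pid, []) + [idx]
--         per_c_pid_dict[i] = d
--     return per_c_pid_dict
-- ===== Notes on version B (the rewrite author's own statement) =====
-- stated objective: faster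
-- what changed: A iterates over set(camera_pids) and re-scans the whole list with repeated .index calls for each distinct pid (quadratic per camera); B makes a single enumerate pass per camera, appending each index to its pid's bucket in a dict, so the inner scanning disappears.
import Mathlib
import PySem

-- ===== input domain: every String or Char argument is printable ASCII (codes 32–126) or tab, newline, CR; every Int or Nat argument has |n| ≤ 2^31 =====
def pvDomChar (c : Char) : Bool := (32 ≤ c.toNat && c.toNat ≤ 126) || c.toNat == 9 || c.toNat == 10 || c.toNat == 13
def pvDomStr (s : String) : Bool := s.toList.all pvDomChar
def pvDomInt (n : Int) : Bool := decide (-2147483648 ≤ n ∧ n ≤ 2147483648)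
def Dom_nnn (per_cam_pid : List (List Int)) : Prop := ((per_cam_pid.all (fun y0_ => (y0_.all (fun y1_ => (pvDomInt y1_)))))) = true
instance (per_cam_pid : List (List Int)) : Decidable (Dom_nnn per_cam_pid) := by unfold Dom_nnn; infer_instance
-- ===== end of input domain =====

-- B replaces A's per-distinct-pid repeated .index scans with one enumerate pass per camera (faster, asymptotically).


-- ===== PORT A =====
-- find_repeat's while loop: s_index strictly increases each iteration, so source.length is
-- enough fuel; 'source.index(elmt, s, len)' (first hit at position ≥ s, ValueError = none) is
-- ported exactly as PySem.List.index? on (source.drop s), shifted by s.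
def findRepeatGo (source : List Int) (elmt : Int) : Nat → Nat → List Int → List Int
  | 0, _, acc => acc
  | fuel+1, s, acc =>
    if s < source.length then
      match PySem.List.index? (source.drop s) elmt with
      | some j => findRepeatGo source elmt fuel (s + j + 1) (acc ++ [((s + j : Nat) : Int)])
      | none => acc
    else acc

def findRepeat (source : List Int) (elmt : Int) : List Int :=
  findRepeatGo source elmt source.length 0 []

def nnn (per_cam_pid : List (List Int)) : List (Int × List (Int × List Int)) :=
  let len_per_cam_pid := PySem.List.len per_cam_pid
  let d :=
    (PySem.List.pyRange 0 len_per_cam_pid 1).foldl (fun d i =>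
        let camera_pids := PySem.List.pyGetD per_cam_pid i []
        let camera_pid_set := PySem.Set.ofList camera_pids
        let inner :=
          camera_pid_set.foldl (fun inner pid =>
              let indexx := findRepeat camera_pids pid
              if inner.contains pid then inner else inner.insert pid indexx)
            (PySem.Dict.empty)
        d.insert i inner)
      (PySem.Dict.empty : PySem.Dict Int (PySem.Dict Int (List Int)))
  d.items.map (fun p => (p.1, p.2.items))

-- ===== PORT B =====
def nnn_alt (per_cam_pid : List (List Int)) : List (Int × List (Int × List Int)) :=
  let d :=
    (PySem.List.enumerate per_cam_pid 0).foldl (fun d p =>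
        let inner :=
          (PySem.List.enumerate p.2 0).foldl (fun dd q =>
              dd.modify q.2 [] (· ++ [q.1]))
            (PySem.Dict.empty : PySem.Dict Int (List Int))
        d.insert p.1 inner)
      (PySem.Dict.empty : PySem.Dict Int (PySem.Dict Int (List Int)))
  d.items.map (fun p => (p.1, p.2.items))

-- ===== PRECONDITION & SPEC =====
def Spec_nnn (per_cam_pid : List (List Int)) (out : List (Int × List (Int × List Int))) : Prop := out = nnn_alt per_cam_pid
instance (per_cam_pid : List (List Int)) (out : List (Int × List (Int × List Int))) : Decidable (Spec_nnn per_cam_pid out) := by unfold Spec_nnn; infer_instance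

-- ===== CLAIM (what is proved, stated in full; the proofs are below) =====
def Claim_equal_nnn : Prop := ∀ (per_cam_pid : List (List Int)), Dom_nnn per_cam_pid → Spec_nnn per_cam_pid (nnn per_cam_pid)

-- ===== LEMMAS AND PROOFS =====

-- occFrom xs v s: the positions ≥ s at which v occurs in xs (what find_repeat's loop still has to emit)
def occFrom (xs : List Int) (v : Int) (s : Nat) : List Int :=
  ((PySem.List.enumerate (xs.drop s) (s : Int)).filter (fun p => p.2 == v)).map (·.1)

lemma occFrom_of_ge (xs : List Int) (v : Int) (s : Nat) (h : xs.length ≤ s) :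
    occFrom xs v s = [] := by
  simp [occFrom, List.drop_eq_nil_of_le h, PySem.List.enumerate_nil]

lemma findRepeatGo_spec (xs : List Int) (v : Int) (fuel s : Nat) (acc : List Int)
    (hf : xs.length - s ≤ fuel) :
    findRepeatGo xs v fuel s acc = acc ++ occFrom xs v s := by
  induction fuel generalizing s acc with
  | zero =>
    have : xs.length ≤ s := by omega
    simp [findRepeatGo, occFrom_of_ge xs v s this]
  | succ fuel ih =>
    by_cases hs : s < xs.length
    · rcases hidx : PySem.List.index? (xs.drop s) v with _ | j
      · -- v does not occur at position ≥ s
        have hnm : v ∉ xs.drop s := (PySem.List.index?_eq_none_iff _ _).1 hidx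
        have hnil : occFrom xs v s = [] := by
          simp only [occFrom, List.map_eq_nil_iff, List.filter_eq_nil_iff]
          intro p hp
          rcases (PySem.List.mem_enumerate_iff _ _ _).1 hp with ⟨k, hk, rfl⟩
          simp only [beq_iff_eq]
          intro hpv
          exact hnm (hpv ▸ List.getElem_mem hk)
        simp only [findRepeatGo, hs, if_true, hidx]
        rw [hnil, List.append_nil]
      · -- first occurrence at s + j
        rcases (PySem.List.index?_eq_some_iff _ _ _).1 hidx with ⟨pre, suf, hsplit, hlen, hnpre⟩
        have hsuf : xs.drop (s + j + 1) = suf := by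
          have h1 : xs.drop (s + j + 1) = (xs.drop s).drop (j + 1) := by
            rw [List.drop_drop]; ring_nf
          rw [h1, hsplit, ← hlen]
          simp
        have hocc : occFrom xs v s = ((s + j : Nat) : Int) :: occFrom xs v (s + j + 1) := by
          unfold occFrom
          rw [hsplit, hsuf]
          rw [show pre ++ v :: suf = pre ++ [v] ++ suf by simp]
          rw [PySem.List.enumerate_append, PySem.List.enumerate_append]
          have hpre_nil :
              (PySem.List.enumerate pre (s : Int)).filter (fun p => p.2 == v) = [] := by
            rw [List.filter_eq_nil_iff]
            intro p hp
            rcases (PySem.List.mem_enumerate_iff _ _ _).1 hp with ⟨k, hk, rfl⟩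
            simp only [beq_iff_eq]
            intro hpv
            exact hnpre (hpv ▸ List.getElem_mem hk)
          simp [List.filter_append, hpre_nil, PySem.List.enumerate_cons,
            PySem.List.enumerate_nil, hlen]
          rw [add_assoc]
        have hfuel' : xs.length - (s + j + 1) ≤ fuel := by omega
        simp only [findRepeatGo, hs, if_true, hidx]
        rw [ih (s + j + 1) _ hfuel', hocc]
        simp
    · have hle : xs.length ≤ s := by omega
      simp only [findRepeatGo, if_neg hs]
      rw [occFrom_of_ge xs v s hle, List.append_nil]

-- find_repeat xs v = all indices of v in xs, in order
lemma findRepeat_eq (xs : List Int) (v : Int) :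
    findRepeat xs v =
      ((PySem.List.enumerate xs 0).filter (fun p => p.2 == v)).map (·.1) := by
  rw [findRepeat, findRepeatGo_spec xs v xs.length 0 [] (by omega)]
  simp [occFrom]

-- A's inner loop: over distinct fresh keys the guarded insert just appends
lemma items_foldl_guarded_insert (f : Int → List Int) (l : List Int)
    (d : PySem.Dict Int (List Int)) (hfresh : ∀ a ∈ l, d.contains a = false)
    (hnd : l.Nodup) :
    (l.foldl (fun d pid => if d.contains pid then d else d.insert pid (f pid)) d).items
      = d.items ++ l.map (fun p => (p, f p)) := by
  induction l generalizing d with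
  | nil => simp
  | cons a l ih =>
    have ha : d.contains a = false := hfresh a (by simp)
    have hnd' : l.Nodup := hnd.of_cons
    have hfresh' : ∀ b ∈ l, (d.insert a (f a)).contains b = false := by
      intro b hb
      rw [PySem.Dict.contains_insert]
      have hba : b ≠ a := fun h => (List.nodup_cons.1 hnd).1 (h ▸ hb)
      simp [hba, hfresh b (List.mem_cons_of_mem _ hb)]
    simp only [List.foldl_cons, ha, Bool.false_eq_true, if_false]
    rw [ih _ hfresh' hnd', PySem.Dict.items_insert_of_not_contains _ _ ha]
    simp

-- B's inner loop, via swap + getD_foldl_modify_append: each pid's bucket is its index list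
lemma innerB_getD (xs : List Int) (c : Int) :
    ((PySem.List.enumerate xs 0).foldl (fun dd q => dd.modify q.2 [] (· ++ [q.1]))
        (PySem.Dict.empty : PySem.Dict Int (List Int))).getD c []
      = ((PySem.List.enumerate xs 0).filter (fun p => p.2 == c)).map (·.1) := by
  have h := PySem.Dict.getD_foldl_modify_append
    ((PySem.List.enumerate xs 0).map Prod.swap)
    (PySem.Dict.empty : PySem.Dict Int (List Int)) c
  rw [List.foldl_map] at h
  simp only [Prod.fst_swap, Prod.snd_swap] at h
  rw [h]
  simp [List.filter_map, Function.comp_def, List.map_map]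

lemma innerB_keys (xs : List Int) :
    ((PySem.List.enumerate xs 0).foldl (fun dd q => dd.modify q.2 [] (· ++ [q.1]))
        (PySem.Dict.empty : PySem.Dict Int (List Int))).keys = PySem.Set.ofList xs := by
  have h := PySem.Dict.keys_foldl_modify_key (PySem.List.enumerate xs 0)
    (fun q => q.2) ([] : List Int) (fun _ q => (· ++ [q.1]))
    (PySem.Dict.empty : PySem.Dict Int (List Int))
  rw [h]
  rw [PySem.List.map_snd_enumerate]
  rfl

-- inner dicts agree (as item lists)
lemma inner_items_eq (xs : List Int) :
    ((PySem.Set.ofList xs).foldl (fun inner pid =>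
        let indexx := findRepeat xs pid
        if inner.contains pid then inner else inner.insert pid indexx)
      (PySem.Dict.empty : PySem.Dict Int (List Int))).items
    = ((PySem.List.enumerate xs 0).foldl (fun dd q => dd.modify q.2 [] (· ++ [q.1]))
        (PySem.Dict.empty : PySem.Dict Int (List Int))).items := by
  have hA := items_foldl_guarded_insert (fun pid => findRepeat xs pid)
    (PySem.Set.ofList xs) PySem.Dict.empty (by intro a _; simp)
    (PySem.Set.nodup_ofList xs)
  have hBnodup :
      ((PySem.List.enumerate xs 0).foldl (fun dd q => dd.modify q.2 [] (· ++ [q.1]))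
        (PySem.Dict.empty : PySem.Dict Int (List Int))).keys.Nodup :=
    PySem.Dict.nodup_keys_foldl_modify_key _ _ _ _ _ (by simp)
  have hB := PySem.Dict.items_eq_map_keys _ hBnodup ([] : List Int)
  rw [hA, hB, innerB_keys]
  simp only [show (PySem.Dict.empty : PySem.Dict Int (List Int)).items = [] from rfl,
    List.nil_append]
  apply List.map_congr_left
  intro p _
  rw [innerB_getD, findRepeat_eq]

-- ===== VERDICT (by name: the statement is the Claim_ definition above) =====
theorem nnn_spec : Claim_equal_nnn := by
  intro per_cam_pid _
  unfold Spec_nnn nnn nnn_alt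
  simp only []
  have hA := PySem.Dict.items_foldl_insert_fresh
    (PySem.List.pyRange 0 (PySem.List.len per_cam_pid) 1) (fun i => i)
    (fun i =>
      (PySem.Set.ofList (PySem.List.pyGetD per_cam_pid i [])).foldl (fun inner pid =>
          let indexx := findRepeat (PySem.List.pyGetD per_cam_pid i []) pid
          if inner.contains pid then inner else inner.insert pid indexx)
        (PySem.Dict.empty : PySem.Dict Int (List Int)))
    PySem.Dict.empty (by intro a _; simp) (by simpa using PySem.List.nodup_pyRange_one 0 _)
  have hB := PySem.Dict.items_foldl_insert_fresh
    (PySem.List.enumerate per_cam_pid 0) (fun p => p.1)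
    (fun p =>
      (PySem.List.enumerate p.2 0).foldl (fun dd q => dd.modify q.2 [] (· ++ [q.1]))
        (PySem.Dict.empty : PySem.Dict Int (List Int)))
    PySem.Dict.empty (by intro a _; simp)
    (by rw [PySem.List.map_fst_enumerate]; simpa using PySem.List.nodup_pyRange_one 0 _)
  rw [hA, hB]
  rw [PySem.List.enumerate_eq_map_pyRange per_cam_pid ([] : List Int), List.map_map]
  simp only [show (PySem.Dict.empty : PySem.Dict Int (PySem.Dict Int (List Int))).items = []
      from rfl, List.nil_append, List.map_map, PySem.List.len_eq]
  apply List.map_congr_left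
  intro i _
  simp only [Function.comp_def]
  exact congrArg (fun l => (i, l)) (inner_items_eq _)
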